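-- pv_equiv track=rewrite | github.com/nathanrjackson/bible-search | bible_search.py | find_chapters
-- ===== SOURCE A (Python) =====
-- BOOK_NAME_INDEX = 1
--
-- CHAPTER_INDEX = 3
--
-- def find_chapters(scriptures, desired_book):
--     """Find chapters in a desired book that include the desired keyword(s).
--
--     Parameters:
--         scriptures: A list containing sciptures that include keyword(s).
--         desired_book: The book desired by the user.
--
--     Returns:
--         chapters: a list of chapters that contain the desired keyword(s).
--     """
--     # Create and empty string and empty list
--     chapter_number = ""
--     chapters = []
--
--     # Append each chapter that contains the desired keyword(s)
--     for verse in scriptures: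
--         if (
--             verse[BOOK_NAME_INDEX].lower() == desired_book.lower()
--             and verse[CHAPTER_INDEX] != chapter_number
--         ):
--             chapter_number = verse[CHAPTER_INDEX]
--             chapters.append(chapter_number)
--
--     return chapters
-- ===== SOURCE B (Python) =====
-- BOOK_NAME_INDEX = 1
--
-- CHAPTER_INDEX = 3
--
-- def find_chapters(scriptures, desired_book):
--     """Find chapters in a desired book: filter-then-collapse pipeline."""
--     target = desired_book.lower()
--     chapters = [verse[CHAPTER_INDEX] for verse in scriptures
--                 if verse[BOOK_NAME_INDEX].lower() == target]
--     return [c for prev, c in zip([None] + chapters, chapters) if c != prev]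
-- ===== Notes on version B (the rewrite author's own statement) =====
-- stated objective: idiomatic
-- what changed: Replaces the single stateful loop tracking the previously appended chapter with a two-stage pipeline (a comprehension filtering the matching verses' chapters, then a zip-with-predecessor comprehension collapsing consecutive duplicates), lowering desired_book once instead of once per verse.
-- intended difference: When the first verse of the desired book has the empty string as its chapter value, A silently drops that leading empty chapter (an artefact of its chapter_number = '' sentinel) while B keeps it, which is the intended 'list distinct consecutive chapters' behaviour. — e.g. on find_chapters([["1", "Gen", "1", ""], ["2", "Gen", "1", "3"]], "gen"): A returns ["3"], B returns ["", "3"]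
import Mathlib
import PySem

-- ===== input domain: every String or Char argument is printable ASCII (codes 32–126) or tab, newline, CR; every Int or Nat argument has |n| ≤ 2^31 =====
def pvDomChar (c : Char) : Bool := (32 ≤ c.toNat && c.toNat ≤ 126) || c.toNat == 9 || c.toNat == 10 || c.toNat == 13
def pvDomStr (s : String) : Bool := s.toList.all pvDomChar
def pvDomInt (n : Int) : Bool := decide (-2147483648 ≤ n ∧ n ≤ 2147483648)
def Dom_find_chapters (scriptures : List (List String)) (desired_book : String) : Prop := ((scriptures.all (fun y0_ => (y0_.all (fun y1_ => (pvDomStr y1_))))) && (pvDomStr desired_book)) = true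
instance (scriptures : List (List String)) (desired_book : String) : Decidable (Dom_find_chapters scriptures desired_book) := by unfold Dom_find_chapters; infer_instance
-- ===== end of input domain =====

-- B replaces A's single stateful loop with an idiomatic filter-then-collapse pipeline;
-- return values only (no argument is mutated by either program).

-- ===== PORT A =====
-- A's loop body (the if/assignment inside the for), state = (chapter_number, chapters)
def pvStepA (desired_book : String) (st : String × List String) (verse : List String) : String × List String :=
  if PySem.Str.lower ((PySem.List.pyGet? verse 1).getD "") == PySem.Str.lower desired_book
      && !((PySem.List.pyGet? verse 3).getD "" == st.1) then
    ((PySem.List.pyGet? verse 3).getD "", st.2 ++ [(PySem.List.pyGet? verse 3).getD ""])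
  else st

-- literal transliteration of A's loop
def find_chapters (scriptures : List (List String)) (desired_book : String) : List String :=
  (scriptures.foldl (pvStepA desired_book) ("", [])).2

-- ===== PORT B =====
-- literal transliteration of Source B: filter comprehension, then zip-with-predecessor comprehension
def find_chapters_alt (scriptures : List (List String)) (desired_book : String) : List String :=
  let target := PySem.Str.lower desired_book
  let chapters :=
    (scriptures.filter
      (fun verse => PySem.Str.lower ((PySem.List.pyGet? verse 1).getD "") == target)).map
      (fun verse => (PySem.List.pyGet? verse 3).getD "")
  ((List.zip ((none : Option String) :: chapters.map some) chapters).filter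
      (fun pc => !(some pc.2 == pc.1))).map (·.2)

-- ===== PRECONDITION & SPEC =====
-- Pre_ excludes exactly the inputs where A raises IndexError: a verse with fewer than 2
-- fields, or a verse whose book name matches but which has fewer than 4 fields.
def Pre_find_chapters (scriptures : List (List String)) (desired_book : String) : Prop :=
  ∀ verse ∈ scriptures, 2 ≤ verse.length ∧
    (PySem.Str.lower ((PySem.List.pyGet? verse 1).getD "") = PySem.Str.lower desired_book →
      4 ≤ verse.length)
instance (scriptures : List (List String)) (desired_book : String) : Decidable (Pre_find_chapters scriptures desired_book) := by unfold Pre_find_chapters; infer_instance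

def pvWitness_find_chapters : List (List String) × String :=
  ([["1", "Gen", "1", "1"], ["2", "Gen", "1", "2"], ["3", "Ex", "1", "1"]], "gen")

-- chapter field (index 3) of the first verse whose book field (index 1) matches, if any
def pvFirstChapter (desired_book : String) : List (List String) → Option String
  | [] => none
  | verse :: rest =>
    if PySem.Str.lower (verse.getD 1 "") = PySem.Str.lower desired_book
    then some (verse.getD 3 "") else pvFirstChapter desired_book rest

-- When the first verse of the desired book has "" as its chapter value, A silently drops
-- that leading empty chapter (an artefact of its chapter_number = "" sentinel) while B
-- keeps it, which is the intended "list distinct consecutive chapters" behaviour.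
def D_find_chapters (scriptures : List (List String)) (desired_book : String) : Prop :=
  pvFirstChapter desired_book scriptures = some ""
instance (scriptures : List (List String)) (desired_book : String) : Decidable (D_find_chapters scriptures desired_book) := by unfold D_find_chapters; infer_instance

def Spec_find_chapters (scriptures : List (List String)) (desired_book : String) (out : List String) : Prop := ¬ D_find_chapters scriptures desired_book → out = find_chapters_alt scriptures desired_book
instance (scriptures : List (List String)) (desired_book : String) (out : List String) : Decidable (Spec_find_chapters scriptures desired_book out) := by unfold Spec_find_chapters; infer_instance

def pvDiffWitness_find_chapters : List (List String) × String :=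
  ([["1", "Gen", "1", ""], ["2", "Gen", "1", "3"]], "gen")
def pvDiffWitnessOut_find_chapters : (List String) × (List String) := (["3"], ["", "3"])

-- ===== CLAIM (what is proved, stated in full; the proofs are below) =====
def Claim_unchanged_find_chapters : Prop := ∀ (scriptures : List (List String)) (desired_book : String), Dom_find_chapters scriptures desired_book → Pre_find_chapters scriptures desired_book → Spec_find_chapters scriptures desired_book (find_chapters scriptures desired_book)
def Claim_changed_find_chapters : Prop := Dom_find_chapters (pvDiffWitness_find_chapters.1) (pvDiffWitness_find_chapters.2) ∧ Pre_find_chapters (pvDiffWitness_find_chapters.1) (pvDiffWitness_find_chapters.2) ∧ D_find_chapters (pvDiffWitness_find_chapters.1) (pvDiffWitness_find_chapters.2) ∧ find_chapters (pvDiffWitness_find_chapters.1) (pvDiffWitness_find_chapters.2) = pvDiffWitnessOut_find_chapters.1 ∧ find_chapters_alt (pvDiffWitness_find_chapters.1) (pvDiffWitness_find_chapters.2) = pvDiffWitnessOut_find_chapters.2 ∧ pvDiffWitnessOut_find_chapters.1 ≠ pvDiffWitnessOut_find_chapters.2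
def Claim_exact_find_chapters : Prop := ∀ (scriptures : List (List String)) (desired_book : String), Dom_find_chapters scriptures desired_book → Pre_find_chapters scriptures desired_book → D_find_chapters scriptures desired_book → find_chapters scriptures desired_book ≠ find_chapters_alt scriptures desired_book

-- ===== LEMMAS AND PROOFS =====

theorem pvGetN (xs : List String) (n : Nat) :
    (PySem.List.pyGet? xs (n : Int)).getD "" = xs.getD n "" := by
  simp [PySem.List.pyGet?_natCast, List.getD_eq_getElem?_getD]

theorem pvGet1 (xs : List String) : (PySem.List.pyGet? xs 1).getD "" = xs.getD 1 "" := by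
  exact_mod_cast pvGetN xs 1

theorem pvGet3 (xs : List String) : (PySem.List.pyGet? xs 3).getD "" = xs.getD 3 "" := by
  exact_mod_cast pvGetN xs 3

-- the first-match scan equals head-of-filter
theorem pvFirstChapterEq (desired_book : String) :
    ∀ (ss : List (List String)),
      pvFirstChapter desired_book ss
        = ((ss.filter
            (fun verse => PySem.Str.lower ((PySem.List.pyGet? verse 1).getD "")
              == PySem.Str.lower desired_book)).head?.map
            (fun verse => (PySem.List.pyGet? verse 3).getD "")) := by
  intro ss
  induction ss with
  | nil => simp [pvFirstChapter]
  | cons v rest ih =>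
    by_cases hb : PySem.Str.lower (v.getD 1 "") = PySem.Str.lower desired_book
    all_goals simp only [List.getD_eq_getElem?_getD] at hb
    · simp [pvFirstChapter, List.filter_cons, pvGet1, pvGet3, hb]
    · simp [pvFirstChapter, List.filter_cons, pvGet1, hb, ih]

-- collapse of consecutive duplicates, carrying the actual previous element
def pvGo (p : String) : List String → List String
  | [] => []
  | c :: rest => if c = p then pvGo c rest else c :: pvGo c rest

-- A's fold over the scriptures equals pvGo over the filtered chapter list
theorem pvFoldA (desired_book : String) :
    ∀ (ss : List (List String)) (p : String) (acc : List String),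
      (ss.foldl (pvStepA desired_book) (p, acc)).2
      = acc ++ pvGo p ((ss.filter
          (fun verse => PySem.Str.lower ((PySem.List.pyGet? verse 1).getD "")
            == PySem.Str.lower desired_book)).map
          (fun verse => (PySem.List.pyGet? verse 3).getD "")) := by
  intro ss
  induction ss with
  | nil => simp [pvGo]
  | cons v rest ih =>
    intro p acc
    rw [List.foldl_cons]
    by_cases hb : PySem.Str.lower ((PySem.List.pyGet? v 1).getD "") = PySem.Str.lower desired_book
    · by_cases hc : (PySem.List.pyGet? v 3).getD "" = p
      · have h1 : pvStepA desired_book (p, acc) v = (p, acc) := by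
          simp [pvStepA, hb, hc]
        rw [h1, ih]
        simp [hb, pvGo, hc]
      · have h1 : pvStepA desired_book (p, acc) v
            = ((PySem.List.pyGet? v 3).getD "", acc ++ [(PySem.List.pyGet? v 3).getD ""]) := by
          simp [pvStepA, hb, hc]
        rw [h1, ih]
        simp [hb, pvGo, hc]
    · have h1 : pvStepA desired_book (p, acc) v = (p, acc) := by
        simp [pvStepA, hb]
      rw [h1, ih]
      simp [hb]

-- B's zip-with-predecessor comprehension equals pvGo after the first element
theorem pvZipB :
    ∀ (cs : List String) (q : String),
      ((List.zip (some q :: cs.map some) cs).filter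
          (fun pc => !(some pc.2 == pc.1))).map (·.2) = pvGo q cs := by
  intro cs
  induction cs with
  | nil => intro q; simp [pvGo]
  | cons c rest ih =>
    intro q
    simp only [List.map_cons, List.zip_cons_cons, List.filter_cons]
    by_cases h : c = q
    · simp only [h, pvGo]
      rw [← ih q]
      simp
    · simp only [pvGo, if_neg h]
      rw [← ih c]
      simp [h]

-- B's value, in pvGo form
theorem pvAltEq (scriptures : List (List String)) (desired_book : String) :
    find_chapters_alt scriptures desired_book
      = match ((scriptures.filter
          (fun verse => PySem.Str.lower ((PySem.List.pyGet? verse 1).getD "")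
            == PySem.Str.lower desired_book)).map
          (fun verse => (PySem.List.pyGet? verse 3).getD "")) with
        | [] => []
        | c :: rest => c :: pvGo c rest := by
  unfold find_chapters_alt
  cases hcs : ((scriptures.filter
      (fun verse => PySem.Str.lower ((PySem.List.pyGet? verse 1).getD "")
        == PySem.Str.lower desired_book)).map
      (fun verse => (PySem.List.pyGet? verse 3).getD "")) with
  | nil => simp [hcs]
  | cons c rest =>
    simp only [hcs]
    simp only [List.map_cons, List.zip_cons_cons, List.filter_cons]
    rw [← pvZipB rest c]
    simp

-- A's value, in pvGo form
theorem pvAEq (scriptures : List (List String)) (desired_book : String) :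
    find_chapters scriptures desired_book
      = pvGo "" ((scriptures.filter
          (fun verse => PySem.Str.lower ((PySem.List.pyGet? verse 1).getD "")
            == PySem.Str.lower desired_book)).map
          (fun verse => (PySem.List.pyGet? verse 3).getD "")) := by
  unfold find_chapters
  simpa using pvFoldA desired_book scriptures "" []

-- ===== VERDICT (by name: the statement is the Claim_ definition above) =====
theorem find_chapters_spec : Claim_unchanged_find_chapters := by
  intro scriptures desired_book _ _ hD
  rw [pvAEq, pvAltEq]
  cases hcs : ((scriptures.filter
      (fun verse => PySem.Str.lower ((PySem.List.pyGet? verse 1).getD "")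
        == PySem.Str.lower desired_book)).map
      (fun verse => (PySem.List.pyGet? verse 3).getD "")) with
  | nil => simp [pvGo]
  | cons c rest =>
    have hh : ((scriptures.filter
        (fun verse => PySem.Str.lower ((PySem.List.pyGet? verse 1).getD "")
          == PySem.Str.lower desired_book)).head?.map
        (fun verse => (PySem.List.pyGet? verse 3).getD "")) = some c := by
      rw [← List.head?_map, hcs]
      rfl
    have hc : c ≠ "" := by
      intro h
      apply hD
      unfold D_find_chapters
      rw [pvFirstChapterEq, hh, h]
    simp [pvGo, hc]

theorem find_chapters_changed : Claim_changed_find_chapters := by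
  unfold Claim_changed_find_chapters; decide

theorem find_chapters_tight : Claim_exact_find_chapters := by
  intro scriptures desired_book _ _ hD
  unfold D_find_chapters at hD
  rw [pvFirstChapterEq] at hD
  rw [pvAEq, pvAltEq]
  cases hfl : (scriptures.filter
      (fun verse => PySem.Str.lower ((PySem.List.pyGet? verse 1).getD "")
        == PySem.Str.lower desired_book)) with
  | nil => rw [hfl] at hD; simp at hD
  | cons w ws =>
    rw [hfl] at hD
    simp only [List.head?_cons, Option.map_some, Option.some.injEq] at hD
    simp only [List.map_cons, hD]
    simp only [pvGo, if_true]
    intro h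
    have := congrArg List.length h
    simp at this
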